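-- pv_equiv track=rewrite | github.com/idk-who/My_GFG_Solutions | Difficulty: Medium/Group Balls by Sequence/group-balls-by-sequence.py | validgroup
-- ===== SOURCE A (Python) =====
-- def validgroup(arr, k):
--     n = len(arr)
--
--     if n % k:
--         return False
--
--     if k == 1:
--         return True
--
--     arr.sort()
--     index = 0
--
--     while index < n - 1:
--         group_count = 1
--         current_value = arr[index]
--
--         while index < n - 1 and arr[index] == arr[index + 1]:
--             group_count += 1
--             index += 1
--         index += 1
--
--         remaining_in_group = k - 1
--
--         if index + remaining_in_group * group_count > n:
--             return False
--
--         while remaining_in_group: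
--             if index < n and current_value + 1 != arr[index]:
--                 return False
--
--             next_count = 1
--             while index < n - 1 and arr[index] == arr[index + 1]:
--                 next_count += 1
--                 index += 1
--
--             if next_count != group_count:
--                 return False
--
--             index += 1
--             remaining_in_group -= 1
--             current_value += 1
--
--     return True
-- ===== SOURCE B (Python) =====
-- def validgroup(arr, k):
--     # Return-value equivalent to A for k >= 1; like A, sorts arr in place.
--     if len(arr) % k:
--         return False
--     if k == 1:
--         return True
--     arr.sort()
--     # run-length encode the sorted list
--     runs = []
--     for x in arr:
--         if runs and runs[-1][0] == x:
--             runs[-1][1] += 1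
--         else:
--             runs.append([x, 1])
--     # consume the runs k at a time: values consecutive, all counts equal
--     while runs:
--         chunk, runs = runs[:k], runs[k:]
--         if len(chunk) != k:
--             return False
--         v, c0 = chunk[0]
--         for w, c in chunk[1:]:
--             if w != v + 1 or c != c0:
--                 return False
--             v = w
--     return True
-- ===== Notes on version B (the rewrite author's own statement) =====
-- stated objective: alternative
-- what changed: A validates with one interleaved while-scan over the sorted array (index arithmetic, a capacity pre-check and a nested count-matching loop); B first builds a run-length encoding of the sorted array and then consumes that run table k runs at a time, checking consecutive values and equal counts per chunk.
-- outside the precondition, e.g. on validgroup([1, 5], -2): A returns False, B returns False; on validgroup([1, 2], -2): A does not finish within the time limit, B returns False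
import Mathlib
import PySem

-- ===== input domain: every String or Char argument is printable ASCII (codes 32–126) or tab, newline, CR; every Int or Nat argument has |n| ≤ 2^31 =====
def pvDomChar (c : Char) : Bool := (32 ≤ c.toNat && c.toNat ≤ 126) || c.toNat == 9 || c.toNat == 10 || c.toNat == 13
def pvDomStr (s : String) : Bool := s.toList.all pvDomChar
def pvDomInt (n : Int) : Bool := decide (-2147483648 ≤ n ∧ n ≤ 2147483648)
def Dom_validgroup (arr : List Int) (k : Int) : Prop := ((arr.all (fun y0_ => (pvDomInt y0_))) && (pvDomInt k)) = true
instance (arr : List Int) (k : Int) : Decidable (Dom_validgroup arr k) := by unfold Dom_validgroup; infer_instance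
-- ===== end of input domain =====

-- B rebuilds the check as run-length-encode then chunk-verify (alternative decomposition, same cost);
-- both A and B sort their argument in place in Python — the equivalence proved here is about the return value.

-- ===== PORT A =====
-- inner scan `while index < n - 1 and arr[index] == arr[index + 1]: count += 1; index += 1`
-- (fuel only totalizes the while loop; with fuel ≥ the run length it is exact)
def aScan (s : List Int) (n : Int) : Nat → Int → Int → Int × Int
  | 0, c, i => (c, i)
  | f + 1, c, i =>
      if i < n - 1 ∧ PySem.List.pyGet? s i = PySem.List.pyGet? s (i + 1) then
        aScan s n f (c + 1) (i + 1)
      else (c, i)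

-- `while remaining_in_group:` body; none = `return False`, some i = loop left with this index
-- (fuel totalizes: Python diverges here for some k < 0, outside Pre_)
def aInner (s : List Int) (n : Int) : Nat → Int → Int → Int → Int → Option Int
  | 0, _, i, _, _ => some i
  | f + 1, rem, i, cur, gc =>
      if rem ≠ 0 then
        if i < n ∧ ¬(PySem.List.pyGet? s i = some (cur + 1)) then none
        else
          let p := aScan s n (s.length + 1) 1 i
          if p.1 ≠ gc then none
          else aInner s n f (rem - 1) (p.2 + 1) (cur + 1) gc
      else some i

-- outer `while index < n - 1` loop (fuel n+1 is exact: the index strictly increases)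
def aOuter (s : List Int) (n k : Int) : Nat → Int → Bool
  | 0, _ => true
  | f + 1, i =>
      if i < n - 1 then
        let cur := (PySem.List.pyGet? s i).getD 0   -- arr[index]; in range whenever 0 ≤ i < n - 1
        let p := aScan s n (s.length + 1) 1 i
        let i2 := p.2 + 1
        if i2 + (k - 1) * p.1 > n then false
        else
          match aInner s n (k - 1).natAbs (k - 1) i2 cur p.1 with
          | none => false
          | some i3 => aOuter s n k f i3
      else true

def validgroup (arr : List Int) (k : Int) : Bool :=
  let n : Int := arr.length
  if PySem.Int.mod n k ≠ 0 then false
  else if k = 1 then true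
  else
    let s := PySem.List.sorted arr (fun x => x) false
    aOuter s n k (s.length + 1) 0

-- ===== PORT B =====
-- one step of `for x in arr:` building the run-length encoding (runs[-1][1] += 1 / runs.append([x,1]))
def bStep (runs : List (Int × Int)) (x : Int) : List (Int × Int) :=
  match runs.getLast? with
  | some (v, c) => if v = x then runs.dropLast ++ [(v, c + 1)] else runs ++ [(x, 1)]
  | none => [(x, 1)]

-- `for w, c in chunk[1:]: if w != v + 1 or c != c0: return False; v = w`
def bGroup (v c0 : Int) : List (Int × Int) → Bool
  | [] => true
  | (w, c) :: rest => if w = v + 1 ∧ c = c0 then bGroup w c0 rest else false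

-- `while runs: chunk, runs = runs[:k], runs[k:]; …` (fuel totalizes; exact for k ≥ 2)
def bChunks (k : Int) : Nat → List (Int × Int) → Bool
  | _, [] => true
  | 0, _ => false
  | f + 1, runs =>
      if ¬(((PySem.List.slice runs none (some k)).length : Int) = k) then false
      else
        match PySem.List.slice runs none (some k) with
        | [] => false   -- Python would raise IndexError at chunk[0]; only reachable for k = 0, outside Pre_
        | (v0, c0) :: tl =>
            if bGroup v0 c0 tl then bChunks k f (PySem.List.slice runs (some k) none) else false

def validgroup_alt (arr : List Int) (k : Int) : Bool :=
  let n : Int := arr.length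
  if PySem.Int.mod n k ≠ 0 then false
  else if k = 1 then true
  else
    let s := PySem.List.sorted arr (fun x => x) false
    let runs := s.foldl bStep []
    bChunks k (runs.length + 1) runs

-- ===== PRECONDITION & SPEC =====
-- Pre_ admits every k ≥ 1 (the natural domain: a positive group size) and, for k ≤ 0, the
-- inputs rejected by the first guard; the remaining excluded inputs are k = 0 with len(arr) % 0
-- raising ZeroDivisionError and k < 0 dividing len(arr), where A diverges in its inner while
-- loop or returns an accidental value outside the function's purpose.
def Pre_validgroup (arr : List Int) (k : Int) : Prop :=
  1 ≤ k ∨ (k ≠ 0 ∧ PySem.Int.mod (arr.length : Int) k ≠ 0)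
instance (arr : List Int) (k : Int) : Decidable (Pre_validgroup arr k) := by unfold Pre_validgroup; infer_instance
def pvWitness_validgroup : List Int × Int := ([2, 1, 2, 1], 2)

def Spec_validgroup (arr : List Int) (k : Int) (out : Bool) : Prop := out = validgroup_alt arr k
instance (arr : List Int) (k : Int) (out : Bool) : Decidable (Spec_validgroup arr k out) := by unfold Spec_validgroup; infer_instance

-- ===== CLAIM (what is proved, stated in full; the proofs are below) =====
def Claim_equal_validgroup : Prop := ∀ (arr : List Int) (k : Int), Dom_validgroup arr k → Pre_validgroup arr k → Spec_validgroup arr k (validgroup arr k)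

-- ===== LEMMAS AND PROOFS =====

-- leading-run length: number of leading elements of the list equal to v
def pc (v : Int) : List Int → Nat
  | [] => 0
  | x :: xs => if x = v then pc v xs + 1 else 0

lemma pc_le_length (v : Int) (xs : List Int) : pc v xs ≤ xs.length := by
  induction xs with
  | nil => simp [pc]
  | cons x xs ih => by_cases h : x = v <;> simp [pc, h] <;> omega

-- run-length encoding, leading run first
def runsOf : List Int → List (Int × Int)
  | [] => []
  | x :: xs => (x, 1 + (pc x xs : Int)) :: runsOf (xs.drop (pc x xs))
termination_by t => t.length
decreasing_by simp only [List.length_drop, List.length_cons]; omega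

-- spec of one chunk's tail on the raw (sorted) list: consume r more runs, each of value
-- one more than the previous and of length gc
def sGrp (cur gc : Int) : Nat → List Int → Option (List Int)
  | 0, t => some t
  | _ + 1, [] => none
  | r + 1, x :: xs =>
      if x = cur + 1 ∧ (1 + (pc x xs : Int)) = gc then sGrp x gc r (xs.drop (pc x xs))
      else none

lemma sGrp_some_drop {cur gc : Int} {r : Nat} {t t' : List Int}
    (h : sGrp cur gc r t = some t') :
    ∃ d : Nat, t' = t.drop d ∧ (d : Int) = gc * r ∧ d ≤ t.length := by
  induction r generalizing cur t with
  | zero => exact ⟨0, by simpa [sGrp] using h.symm, by simp, by simp⟩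
  | succ r ih =>
      match t with
      | [] => simp [sGrp] at h
      | x :: xs =>
          simp only [sGrp] at h
          split_ifs at h with hc
          · obtain ⟨d, hd, hdr, hdl⟩ := ih h
            refine ⟨pc x xs + 1 + d, ?_, ?_, ?_⟩
            · subst hd
              rw [List.drop_drop]
              rw [show pc x xs + 1 + d = (pc x xs + d) + 1 by omega, List.drop_succ_cons]
            · push_cast
              have hx : gc * ((r : Int) + 1) = gc * r + gc := by ring
              rw [hx, ← hdr, ← hc.2]; ring
            · have h1 := pc_le_length x xs
              simp only [List.length_drop] at hdl
              simp only [List.length_cons]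
              omega

lemma sGrp_some_length_lt {cur gc : Int} {r : Nat} {x : Int} {xs t' : List Int}
    (h : sGrp cur gc r (xs.drop (pc x xs)) = some t') : t'.length < xs.length + 1 := by
  obtain ⟨d, hd, _, _⟩ := sGrp_some_drop h
  have h1 := pc_le_length x xs
  subst hd
  simp only [List.length_drop]
  omega

-- raw-list chunk spec: consume one run and then k-1 matching runs, repeat
def sChunks (k : Int) : List Int → Bool
  | [] => true
  | x :: xs =>
      match h : sGrp x (1 + (pc x xs : Int)) ((k - 1).toNat) (xs.drop (pc x xs)) with
      | none => false
      | some t' => sChunks k t'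
termination_by t => t.length
decreasing_by simpa using sGrp_some_length_lt h

-- run-list forms of the same spec
def rGrp (cur gc : Int) : Nat → List (Int × Int) → Option (List (Int × Int))
  | 0, rs => some rs
  | _ + 1, [] => none
  | r + 1, (v, c) :: rs => if v = cur + 1 ∧ c = gc then rGrp v gc r rs else none

lemma rGrp_some_length {cur gc : Int} {r : Nat} {rs rs' : List (Int × Int)}
    (h : rGrp cur gc r rs = some rs') : rs'.length + r = rs.length := by
  induction r generalizing cur rs with
  | zero => simp_all [rGrp]
  | succ r ih =>
      match rs with
      | [] => simp [rGrp] at h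
      | (w, d) :: rs2 =>
          simp only [rGrp] at h
          split_ifs at h with hc
          · have := ih h
            simp only [List.length_cons]
            omega

def rChunks (k : Int) : List (Int × Int) → Bool
  | [] => true
  | (v, c) :: rs =>
      match h : rGrp v c ((k - 1).toNat) rs with
      | none => false
      | some rs' => rChunks k rs'
termination_by rs => rs.length
decreasing_by have := rGrp_some_length h; simp only [List.length_cons]; omega

lemma pyGet?_of_drop_cons {s : List Int} {j : Nat} {x : Int} {xs : List Int}
    (h : s.drop j = x :: xs) : PySem.List.pyGet? s (j : Int) = some x := by
  rw [PySem.List.pyGet?_natCast, ← List.head?_drop, h, List.head?_cons]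

lemma drop_succ_of_drop_cons {s : List Int} {j : Nat} {x : Int} {xs : List Int}
    (h : s.drop j = x :: xs) : s.drop (j + 1) = xs := by
  rw [← List.tail_drop, h, List.tail_cons]

lemma length_of_drop_cons {s : List Int} {j : Nat} {x : Int} {xs : List Int}
    (h : s.drop j = x :: xs) : s.length = j + xs.length + 1 := by
  have := congrArg List.length h
  simp only [List.length_drop, List.length_cons] at this
  have hj : j < s.length := by
    by_contra hc
    rw [List.drop_eq_nil_iff.2 (by omega)] at h
    simp at h
  omega

lemma aScan_eq (s : List Int) :
    ∀ (m fuel : Nat) (c : Int) (j : Nat) (x : Int) (xs : List Int),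
      s.drop j = x :: xs → pc x xs = m → m ≤ fuel →
      aScan s (s.length : Int) fuel c (j : Int) = (c + (m : Int), (j : Int) + (m : Int)) := by
  intro m
  induction m with
  | zero =>
      intro fuel c j x xs hdrop hpc _
      have hlen := length_of_drop_cons hdrop
      match fuel with
      | 0 => simp [aScan]
      | f + 1 =>
          rw [aScan]
          rw [if_neg]
          · simp
          · intro ⟨h1, h2⟩
            match xs, hpc with
            | [], _ => simp at hlen; omega
            | y :: ys, hpc =>
                have hy : y ≠ x := by
                  intro he; subst he; simp [pc] at hpc
                rw [pyGet?_of_drop_cons hdrop] at h2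
                have : PySem.List.pyGet? s ((j : Int) + 1) = some y := by
                  have := pyGet?_of_drop_cons (drop_succ_of_drop_cons hdrop)
                  push_cast at this ⊢
                  exact this
                rw [this] at h2
                exact hy (by simpa using h2.symm)
  | succ m ih =>
      intro fuel c j x xs hdrop hpc hfuel
      match fuel with
      | 0 => omega
      | f + 1 =>
          match xs, hpc with
          | [], hpc => simp [pc] at hpc
          | y :: ys, hpc =>
              have hyx : y = x := by
                by_contra hc
                simp [pc, hc] at hpc
              subst hyx
              have hpc' : pc y ys = m := by simpa [pc] using hpc
              have hlen := length_of_drop_cons hdrop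
              have hdrop' : s.drop (j + 1) = y :: ys := drop_succ_of_drop_cons hdrop
              rw [aScan, if_pos]
              · have := ih f (c + 1) (j + 1) y ys hdrop' hpc' (by omega)
                push_cast at this ⊢
                rw [this]
                refine Prod.ext ?_ ?_ <;> dsimp <;> ring
              · constructor
                · have hlen2 := length_of_drop_cons hdrop'
                  push_cast; omega
                · rw [pyGet?_of_drop_cons hdrop]
                  have := pyGet?_of_drop_cons hdrop'
                  push_cast at this
                  rw [this]

lemma aInner_some (s : List Int) :
    ∀ (r fuel : Nat) (j : Nat) (cur gc : Int) (t' : List Int),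
      r ≤ fuel →
      sGrp cur gc r (s.drop j) = some t' →
      ∃ d : Nat, (d : Int) = gc * r ∧ t' = s.drop (j + d) ∧
        aInner s (s.length : Int) fuel (r : Int) (j : Int) cur gc = some ((j : Int) + (d : Int)) := by
  intro r
  induction r with
  | zero =>
      intro fuel j cur gc t' _ hg
      refine ⟨0, by simp, by simpa [sGrp] using hg.symm, ?_⟩
      match fuel with
      | 0 => simp [aInner]
      | f + 1 => simp [aInner]
  | succ r ih =>
      intro fuel j cur gc t' hfuel hg
      match fuel with
      | 0 => omega
      | f + 1 =>
          match hdrop : s.drop j with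
          | [] => rw [hdrop] at hg; simp [sGrp] at hg
          | x :: xs =>
              rw [hdrop] at hg
              simp only [sGrp] at hg
              split_ifs at hg with hc
              obtain ⟨hx, hgc⟩ := hc
              have hpcle : pc x xs ≤ xs.length := pc_le_length x xs
              have hlen := length_of_drop_cons hdrop
              have hscan := aScan_eq s (pc x xs) (s.length + 1) 1 j x xs hdrop rfl (by omega)
              have hdropn : s.drop (j + 1 + pc x xs) = xs.drop (pc x xs) := by
                have h1 : s.drop (j + 1) = xs := drop_succ_of_drop_cons hdrop
                calc s.drop (j + 1 + pc x xs) = (s.drop (j + 1)).drop (pc x xs) := by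
                      rw [List.drop_drop]
                  _ = xs.drop (pc x xs) := by rw [h1]
              obtain ⟨d, hd1, hd2, hd3⟩ := ih f (j + 1 + pc x xs) x gc t' (by omega) (by rw [hdropn]; exact hg)
              refine ⟨pc x xs + 1 + d, ?_, ?_, ?_⟩
              · push_cast
                rw [← hgc] at hd1 ⊢
                push_cast at hd1
                rw [show ((r : Int) + 1) = (r : Int) + 1 from rfl]
                have : (d : Int) = (1 + pc x xs) * r := hd1
                rw [mul_add, mul_one, ← this]
                ring
              · rw [hd2]; congr 1; omega
              · rw [aInner]
                rw [if_pos (by push_cast; omega)]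
                rw [if_neg]
                · rw [hscan]
                  dsimp only
                  rw [if_neg (by dsimp; omega)]
                  have harg1 : ((r : Nat) + 1 : Int) - 1 = ((r : Nat) : Int) := by push_cast; ring
                  have harg2 : (j : Int) + (pc x xs : Int) + 1 = ((j + 1 + pc x xs : Nat) : Int) := by push_cast; ring
                  rw [show ((↑(r + 1) : Int)) = ((r : Nat) : Int) + 1 by push_cast; ring]
                  rw [show ((r : Nat) : Int) + 1 - 1 = ((r : Nat) : Int) by ring]
                  rw [show (cur + 1) = x by omega]
                  rw [harg2, hd3]
                  congr 1
                  push_cast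
                  ring
                · intro ⟨_, hbad⟩
                  rw [pyGet?_of_drop_cons hdrop] at hbad
                  exact hbad (by rw [hx])

lemma aInner_none (s : List Int) :
    ∀ (r fuel : Nat) (j : Nat) (cur gc : Int),
      r ≤ fuel →
      sGrp cur gc r (s.drop j) = none →
      aInner s (s.length : Int) fuel (r : Int) (j : Int) cur gc = none ∨
        (gc = 1 ∧ (s.drop j).length < r) := by
  intro r
  induction r with
  | zero => intro fuel j cur gc _ hg; simp [sGrp] at hg
  | succ r ih =>
      intro fuel j cur gc hfuel hg
      match fuel with
      | 0 => omega
      | f + 1 =>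
          match hdrop : s.drop j with
          | [] =>
              by_cases hgc1 : gc = 1
              · right; simp [hgc1]
              · left
                have hjlen : s.length ≤ j := by
                  by_contra hc
                  have := congrArg List.length hdrop
                  simp only [List.length_drop, List.length_nil] at this
                  omega
                rw [aInner]
                rw [if_pos (by push_cast; omega)]
                rw [if_neg (by intro ⟨h1, _⟩; push_cast at h1; omega)]
                rw [show aScan s (s.length : Int) (s.length + 1) 1 (j : Int) = (1, (j : Int)) from by
                  rw [aScan]; rw [if_neg (by intro ⟨h1, _⟩; push_cast at h1; omega)]]
                rw [if_pos (by dsimp; omega)]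
          | x :: xs =>
              rw [hdrop] at hg
              simp only [sGrp] at hg
              have hlen := length_of_drop_cons hdrop
              have hpcle : pc x xs ≤ xs.length := pc_le_length x xs
              have hscan := aScan_eq s (pc x xs) (s.length + 1) 1 j x xs hdrop rfl (by omega)
              by_cases hx : x = cur + 1
              · by_cases hgc : (1 + (pc x xs : Int)) = gc
                · rw [if_pos ⟨hx, hgc⟩] at hg
                  have hdropn : s.drop (j + 1 + pc x xs) = xs.drop (pc x xs) := by
                    have h1 : s.drop (j + 1) = xs := drop_succ_of_drop_cons hdrop
                    calc s.drop (j + 1 + pc x xs) = (s.drop (j + 1)).drop (pc x xs) := by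
                          rw [List.drop_drop]
                      _ = xs.drop (pc x xs) := by rw [h1]
                  have hrec := ih f (j + 1 + pc x xs) x gc (by omega) (by rw [hdropn]; exact hg)
                  rcases hrec with hnone | ⟨hg1, hlt⟩
                  · left
                    rw [aInner]
                    rw [if_pos (by push_cast; omega)]
                    rw [if_neg (by
                      intro ⟨_, hbad⟩
                      rw [pyGet?_of_drop_cons hdrop] at hbad
                      exact hbad (by rw [hx]))]
                    rw [hscan]
                    dsimp only
                    rw [if_neg (by dsimp; omega)]
                    rw [show ((↑(r + 1) : Int)) - 1 = ((r : Nat) : Int) by push_cast; ring]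
                    rw [show (cur + 1) = x by omega]
                    rw [show (j : Int) + (pc x xs : Int) + 1 = ((j + 1 + pc x xs : Nat) : Int) by push_cast; ring]
                    exact hnone
                  · right
                    refine ⟨hg1, ?_⟩
                    have hpc0 : pc x xs = 0 := by omega
                    rw [hdropn] at hlt
                    simp only [List.length_drop] at hlt
                    simp only [List.length_cons]
                    omega
                · left
                  rw [aInner]
                  rw [if_pos (by push_cast; omega)]
                  rw [if_neg (by
                    intro ⟨_, hbad⟩
                    rw [pyGet?_of_drop_cons hdrop] at hbad
                    exact hbad (by rw [hx]))]
                  rw [hscan]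
                  dsimp only
                  rw [if_pos (by dsimp; omega)]
              · left
                rw [aInner]
                rw [if_pos (by push_cast; omega)]
                rw [if_pos]
                constructor
                · push_cast; omega
                · rw [pyGet?_of_drop_cons hdrop]
                  intro hbad
                  exact hx (by simpa using hbad)

lemma aOuter_eq (s : List Int) (k : Int) (hk : 2 ≤ k) (hdvd : k ∣ (s.length : Int)) :
    ∀ (fuel : Nat) (j : Nat), k ∣ (j : Int) → s.length + 1 ≤ fuel + j →
      aOuter s (s.length : Int) k fuel (j : Int) = sChunks k (s.drop j) := by
  intro fuel
  induction fuel with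
  | zero =>
      intro j _ hfuel
      have : s.drop j = [] := List.drop_eq_nil_iff.2 (by omega)
      rw [this, aOuter, sChunks]
  | succ f ih =>
      intro j hj hfuel
      by_cases hcond : (j : Int) < (s.length : Int) - 1
      · match hdrop : s.drop j with
        | [] =>
            exfalso
            have := congrArg List.length hdrop
            simp only [List.length_drop, List.length_nil] at this
            omega
        | x :: xs =>
            have hlen := length_of_drop_cons hdrop
            have hxs : xs ≠ [] := by
              intro he; subst he; simp only [List.length_nil] at hlen; omega
            have hpcle : pc x xs ≤ xs.length := pc_le_length x xs
            have hscan := aScan_eq s (pc x xs) (s.length + 1) 1 j x xs hdrop rfl (by omega)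
            have hdropn : s.drop (j + 1 + pc x xs) = xs.drop (pc x xs) := by
              have h1 : s.drop (j + 1) = xs := drop_succ_of_drop_cons hdrop
              calc s.drop (j + 1 + pc x xs) = (s.drop (j + 1)).drop (pc x xs) := by
                    rw [List.drop_drop]
                _ = xs.drop (pc x xs) := by rw [h1]
            rw [aOuter, if_pos hcond, hscan]
            dsimp only
            rw [sChunks]
            set g : Int := 1 + (pc x xs : Int) with hgdef
            set r : Nat := (k - 1).toNat with hrdef
            have hrk : ((r : Nat) : Int) = k - 1 := by omega
            by_cases hcap : (j : Int) + (pc x xs : Int) + 1 + (k - 1) * g > (s.length : Int)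
            · rw [if_pos hcap]
              match hsg : sGrp x g r (xs.drop (pc x xs)) with
              | some t' =>
                  exfalso
                  obtain ⟨d, _, hdr, hdl⟩ := sGrp_some_drop hsg
                  simp only [List.length_drop] at hdl
                  rw [hrk] at hdr
                  have : g * (k - 1) = (k - 1) * g := by ring
                  omega
              | none => rfl
            · rw [if_neg hcap]
              have hfa : (k - 1).natAbs = r := by omega
              have hfr : r ≤ (k - 1).natAbs := by omega
              have hrem : k - 1 = ((r : Nat) : Int) := hrk.symm
              match hsg : sGrp x g r (xs.drop (pc x xs)) with
              | some t' =>
                  obtain ⟨d, hd1, hd2, hd3⟩ :=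
                    aInner_some s r (k - 1).natAbs (j + 1 + pc x xs) x g t' hfr
                      (by rw [hdropn]; exact hsg)
                  rw [hfa] at hd3
                  rw [hrem]
                  simp only [Int.natAbs_natCast]
                  rw [show (j : Int) + (pc x xs : Int) + 1 = ((j + 1 + pc x xs : Nat) : Int) by push_cast; ring]
                  rw [show ((PySem.List.pyGet? s (j : Int)).getD 0) = x by
                    rw [pyGet?_of_drop_cons hdrop]; rfl]
                  rw [hd3]
                  have hnext : k ∣ ((j + 1 + pc x xs + d : Nat) : Int) := by
                    push_cast
                    rw [show (j : Int) + 1 + (pc x xs : Int) + (d : Int)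
                        = (j : Int) + g * k from by
                      rw [hd1, hrk]; rw [hgdef]; ring]
                    exact dvd_add hj (Dvd.intro_left _ rfl)
                  have hfuel' : s.length + 1 ≤ f + (j + 1 + pc x xs + d) := by omega
                  have := ih (j + 1 + pc x xs + d) hnext hfuel'
                  rw [show ((j + 1 + pc x xs : Nat) : Int) + (d : Int)
                      = ((j + 1 + pc x xs + d : Nat) : Int) by push_cast; ring]
                  dsimp only
                  rw [this, ← hd2]
              | none =>
                  rcases aInner_none s r (k - 1).natAbs (j + 1 + pc x xs) x g hfr
                      (by rw [hdropn]; exact hsg) with hnone | ⟨hg1, hlt⟩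
                  · rw [hfa] at hnone
                    rw [hrem]
                    simp only [Int.natAbs_natCast]
                    rw [show (j : Int) + (pc x xs : Int) + 1 = ((j + 1 + pc x xs : Nat) : Int) by push_cast; ring]
                    rw [show ((PySem.List.pyGet? s (j : Int)).getD 0) = x by
                      rw [pyGet?_of_drop_cons hdrop]; rfl]
                    rw [hnone]
                  · exfalso
                    have hpc0 : pc x xs = 0 := by
                      rw [hgdef] at hg1; omega
                    rw [hdropn] at hlt
                    simp only [List.length_drop, hpc0, Nat.sub_zero] at hlt
                    -- xs.length < r = k-1, so 0 < n - j < k, yet k ∣ (n - j)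
                    have hdj : k ∣ ((s.length : Int) - (j : Int)) := Int.dvd_sub hdvd hj
                    have hlow : 2 ≤ (s.length : Int) - (j : Int) := by omega
                    have hup : (s.length : Int) - (j : Int) < k := by omega
                    have := Int.le_of_dvd (by omega) hdj
                    omega
      · rw [aOuter]
        rw [if_neg hcond]
        match hdrop : s.drop j with
        | [] => rw [sChunks]
        | x :: xs =>
            exfalso
            have hlen := length_of_drop_cons hdrop
            have hxs : xs = [] := by
              cases xs with
              | nil => rfl
              | cons a l => exfalso; simp only [List.length_cons] at hlen; omega
            subst hxs
            -- n - j = 1 but k ∣ j and k ∣ n with k ≥ 2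
            have hdj : k ∣ ((s.length : Int) - (j : Int)) := Int.dvd_sub hdvd hj
            have h1 : (s.length : Int) - (j : Int) = 1 := by
              simp only [List.length_nil] at hlen; omega
            rw [h1] at hdj
            have := Int.le_of_dvd one_pos hdj
            omega

lemma pc_append (y x : Int) (t : List Int) :
    pc y (t ++ [x]) =
      if pc y t = t.length then (if x = y then t.length + 1 else t.length) else pc y t := by
  induction t with
  | nil => by_cases hx : x = y <;> simp [pc, hx]
  | cons z t ih =>
      have hle := pc_le_length y t
      by_cases hz : z = y
      · simp only [List.cons_append, pc, if_pos hz, ih, List.length_cons]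
        split_ifs <;> omega
      · simp only [List.cons_append, pc, if_neg hz, List.length_cons]
        rw [if_neg (by omega)]

lemma bStep_cons (a : Int × Int) (rs : List (Int × Int)) (x : Int) (h : rs ≠ []) :
    bStep (a :: rs) x = a :: bStep rs x := by
  match rs, h with
  | b :: t, _ =>
      obtain ⟨p, hp⟩ := Option.isSome_iff_exists.1 (List.getLast?_isSome.2 (by simp) :
        (b :: t).getLast?.isSome)
      unfold bStep
      rw [show (a :: b :: t).getLast? = (b :: t).getLast? from List.getLast?_cons_cons .., hp]
      obtain ⟨v, c⟩ := p
      by_cases hv : v = x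
      · simp only [if_pos hv]
        rw [List.dropLast_cons₂, List.cons_append]
      · simp only [if_neg hv, List.cons_append]

lemma runsOf_snoc (ys : List Int) (x : Int) :
    runsOf (ys ++ [x]) = bStep (runsOf ys) x := by
  induction ys using runsOf.induct with
  | case1 => simp [runsOf, pc, bStep]
  | case2 y t ih =>
      have hle := pc_le_length y t
      rw [List.cons_append, runsOf, pc_append]
      by_cases hfull : pc y t = t.length
      · rw [if_pos hfull]
        have hdropnil : t.drop (pc y t) = [] := by rw [hfull]; simp
        have hRy : runsOf (y :: t) = [(y, 1 + (t.length : Int))] := by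
          rw [runsOf, hdropnil, runsOf, hfull]
        by_cases hx : x = y
        · rw [if_pos hx]
          have hdrop2 : (t ++ [x]).drop (t.length + 1) = [] := by
            apply List.drop_eq_nil_iff.2; simp
          rw [hdrop2, runsOf, hRy]
          unfold bStep
          simp only [List.getLast?_singleton]
          rw [if_pos hx.symm]
          push_cast
          simp
          ring
        · rw [if_neg hx]
          have hdrop2 : (t ++ [x]).drop t.length = [x] := by
            rw [List.drop_append_of_le_length (le_refl _)]
            simp
          rw [hdrop2, hRy]
          rw [runsOf, pc, List.drop_zero, runsOf]
          unfold bStep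
          simp only [List.getLast?_singleton]
          rw [if_neg (fun h => hx h.symm)]
          simp
      · rw [if_neg hfull]
        have hlt : pc y t < t.length := by omega
        have hdropa : (t ++ [x]).drop (pc y t) = t.drop (pc y t) ++ [x] := by
          rw [List.drop_append_of_le_length (by omega)]
        rw [hdropa, ih]
        rw [runsOf]
        have hne : runsOf (t.drop (pc y t)) ≠ [] := by
          match hd : t.drop (pc y t) with
          | [] => exfalso; have := congrArg List.length hd; simp at this; omega
          | z :: zs => rw [runsOf]; simp
        rw [bStep_cons _ _ _ hne]

lemma foldl_bStep (s : List Int) : s.foldl bStep [] = runsOf s := by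
  induction s using List.reverseRecOn with
  | nil => simp [runsOf]
  | append_singleton ys x ih => rw [List.foldl_append, List.foldl_cons, List.foldl_nil, ih, runsOf_snoc]

lemma rGrp_runsOf (r : Nat) :
    ∀ (cur gc : Int) (t : List Int),
      rGrp cur gc r (runsOf t) = (sGrp cur gc r t).map runsOf := by
  induction r with
  | zero => intro cur gc t; simp [rGrp, sGrp]
  | succ r ih =>
      intro cur gc t
      match t with
      | [] => simp [runsOf, rGrp, sGrp]
      | x :: xs =>
          rw [runsOf, rGrp, sGrp]
          split_ifs with h1
          · exact ih x gc (xs.drop (pc x xs))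
          · simp

lemma sChunks_eq_rChunks (k : Int) (t : List Int) :
    sChunks k t = rChunks k (runsOf t) := by
  induction t using sChunks.induct k with
  | case1 => rw [sChunks, runsOf, rChunks]
  | case2 x xs hsg =>
      rw [sChunks, runsOf, rChunks, rGrp_runsOf, hsg]
      rfl
  | case3 x xs t' hsg ih =>
      rw [sChunks, runsOf, rChunks, rGrp_runsOf, hsg]
      simpa using ih

lemma rGrp_char (r : Nat) :
    ∀ (cur gc : Int) (rs : List (Int × Int)),
      rGrp cur gc r rs =
        if r ≤ rs.length ∧ bGroup cur gc (rs.take r) = true then some (rs.drop r) else none := by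
  induction r with
  | zero => intro cur gc rs; simp [rGrp, bGroup]
  | succ r ih =>
      intro cur gc rs
      match rs with
      | [] => simp [rGrp]
      | (w, c) :: rs' =>
          rw [rGrp, List.take_succ_cons, bGroup]
          by_cases hc : w = cur + 1 ∧ c = gc
          · rw [if_pos hc, ih, if_pos hc]
            simp only [List.length_cons, List.drop_succ_cons]
            exact if_congr (by constructor <;> rintro ⟨h1, h2⟩ <;> exact ⟨by omega, h2⟩) rfl rfl
          · rw [if_neg hc, if_neg hc]
            rw [if_neg (by intro ⟨_, hb⟩; simp at hb)]

lemma bChunks_eq_rChunks (k : Int) (hk : 2 ≤ k) :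
    ∀ (fuel : Nat) (rs : List (Int × Int)), rs.length + 1 ≤ fuel →
      bChunks k fuel rs = rChunks k rs := by
  intro fuel
  induction fuel with
  | zero => intro rs h; omega
  | succ f ih =>
      intro rs hf
      match rs with
      | [] => rw [bChunks, rChunks]
      | (v0, c0) :: tl =>
          rw [bChunks]
          rw [PySem.List.slice_to _ (by omega : (0:Int) ≤ k), PySem.List.slice_from _ (by omega : (0:Int) ≤ k)]
          have hr1 : (k - 1).toNat = k.toNat - 1 := by omega
          rw [rChunks, rGrp_char]
          by_cases hlen : k.toNat ≤ tl.length + 1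
          · have htake : (((v0, c0) :: tl).take k.toNat).length = k.toNat := by
              rw [List.length_take]
              simp only [List.length_cons]
              omega
            rw [if_neg (by rw [htake]; simp; omega)]
            have hkpos : k.toNat = (k.toNat - 1) + 1 := by omega
            rw [hkpos, List.take_succ_cons, List.drop_succ_cons]
            dsimp only
            rw [hr1]
            by_cases hbg : bGroup v0 c0 (tl.take (k.toNat - 1)) = true
            · rw [if_pos hbg, if_pos ⟨by omega, hbg⟩]
              apply ih
              simp only [List.length_cons] at hf
              have : (tl.drop (k.toNat - 1)).length = tl.length - (k.toNat - 1) := by simp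
              omega
            · rw [if_neg hbg, if_neg (by intro ⟨_, hb⟩; exact hbg hb)]
          · rw [if_pos (by
              rw [List.length_take]
              simp only [List.length_cons]
              omega)]
            rw [if_neg (by intro ⟨hlb, _⟩; omega)]
          intro himp
          simp at himp

-- ===== VERDICT (by name: the statement is the Claim_ definition above) =====
theorem validgroup_spec : Claim_equal_validgroup := by
  intro arr k _ hpre
  unfold Spec_validgroup validgroup validgroup_alt
  by_cases hm : PySem.Int.mod ((arr.length : Nat) : Int) k ≠ 0
  · rw [if_pos hm, if_pos hm]
  · have hk1 : 1 ≤ k := hpre.resolve_right (fun hc => hc.2 (of_not_not hm))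
    rw [if_neg hm, if_neg hm]
    by_cases hk : k = 1
    · rw [if_pos hk, if_pos hk]
    · rw [if_neg hk, if_neg hk]
      have hk2 : 2 ≤ k := by omega
      rw [ne_eq, not_not] at hm
      have hdvd0 : k ∣ ((arr.length : Nat) : Int) := (PySem.Int.mod_eq_zero_iff_dvd _ _).1 hm
      have hlen : (PySem.List.sorted arr (fun x => x) false).length = arr.length :=
        PySem.List.length_sorted arr _ false
      have hdvd : k ∣ (((PySem.List.sorted arr (fun x => x) false).length : Nat) : Int) := by
        rw [hlen]; exact hdvd0
      have hA : aOuter (PySem.List.sorted arr (fun x => x) false) ((arr.length : Nat) : Int) k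
          ((PySem.List.sorted arr (fun x => x) false).length + 1) 0
          = sChunks k (PySem.List.sorted arr (fun x => x) false) := by
        rw [← hlen]
        have := aOuter_eq (PySem.List.sorted arr (fun x => x) false) k hk2 hdvd
          ((PySem.List.sorted arr (fun x => x) false).length + 1) 0 (by simp) (by omega)
        simpa using this
      have hB : bChunks k (((PySem.List.sorted arr (fun x => x) false).foldl bStep []).length + 1)
          ((PySem.List.sorted arr (fun x => x) false).foldl bStep [])
          = sChunks k (PySem.List.sorted arr (fun x => x) false) := by
        rw [foldl_bStep]
        rw [bChunks_eq_rChunks k hk2 _ _ (by omega)]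
        exact (sChunks_eq_rChunks k (PySem.List.sorted arr (fun x => x) false)).symm
      rw [hA, hB]
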